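-- pv_equiv track=rewrite | github.com/Jprebys/advent | 2023/7/part_2.py | replace_jokers
-- ===== SOURCE A (Python) =====
-- def replace_jokers(cards: list):
--     if 1 not in cards:
--         return [cards]
--
--     index = cards.index(1)
--     sets = []
--     for i in range(2, 15):
--         new_set = [c for c in cards]
--         new_set[index] = i
--         sets.extend(replace_jokers(new_set))
--
--     return sets
-- ===== SOURCE B (Python) =====
-- def _expand(combos):
--     return [c + [v] for c in combos for v in range(2, 15)]
--
--
-- def replace_jokers(cards: list):
--     idxs = [i for i, c in enumerate(cards) if c == 1]
--     combos = [[]]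
--     for _ in idxs:
--         combos = _expand(combos)
--     result = []
--     for combo in combos:
--         new = list(cards)
--         for j, v in zip(idxs, combo):
--             new[j] = v
--         result.append(new)
--     return result
-- ===== Notes on version B (the rewrite author's own statement) =====
-- stated objective: alternative
-- what changed: Replaces A's one-joker-at-a-time recursion (rebuilding and rescanning the hand at every level) with a non-recursive version: collect all joker positions once, build the full list of replacement tuples by an iterative product fold, then apply each tuple to a single copy of the hand.
import Mathlib
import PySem

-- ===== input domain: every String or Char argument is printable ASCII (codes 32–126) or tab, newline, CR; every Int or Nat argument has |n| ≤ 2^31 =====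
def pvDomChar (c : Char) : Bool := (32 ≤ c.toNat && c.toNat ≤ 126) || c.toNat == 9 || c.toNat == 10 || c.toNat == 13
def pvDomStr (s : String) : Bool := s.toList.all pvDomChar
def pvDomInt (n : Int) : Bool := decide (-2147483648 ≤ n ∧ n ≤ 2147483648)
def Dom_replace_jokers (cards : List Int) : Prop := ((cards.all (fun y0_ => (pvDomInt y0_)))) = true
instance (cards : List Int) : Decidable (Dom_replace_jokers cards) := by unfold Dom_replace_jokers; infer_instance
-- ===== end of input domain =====

-- B replaces A's one-joker-at-a-time recursion with a non-recursive version: collect all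
-- joker positions once, build every replacement tuple by an iterative product fold, then
-- apply each tuple to one copy of the hand (alternative decomposition, same output).


-- ===== PORT A =====
-- termination helper: replacing the first 1 by a non-1 value strictly lowers the count of 1s
theorem pv_count_set_lt (cards : List Int) (i : Int) (hi : i ≠ 1) (h : (1:Int) ∈ cards) :
    (cards.set ((PySem.List.index? cards 1).getD 0) i).count 1 < cards.count 1 := by
  obtain ⟨k, hk⟩ := Option.isSome_iff_exists.mp ((PySem.List.index?_isSome_iff cards 1).mpr h)
  obtain ⟨hklt, hval, -⟩ := PySem.List.getElem_of_index?_eq_some hk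
  have hpos : 0 < cards.count 1 := List.count_pos_iff.mpr h
  rw [hk, Option.getD_some, List.count_set hklt]
  simp [hval, hi]
  omega

def replace_jokers (cards : List Int) : List (List Int) :=
  if h : (1 : Int) ∉ cards then [cards]
  else
    -- index = cards.index(1)  (1 ∈ cards here, so index? is some; getD 0 never takes its default)
    let index := (PySem.List.index? cards 1).getD 0
    -- for i in range(2, 15): new_set = copy of cards; new_set[index] = i; sets.extend(recursion)
    (PySem.List.pyRange 2 15 1).attach.foldl
      (fun sets i => sets ++ replace_jokers (cards.set index i.1)) []
termination_by cards.count 1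
decreasing_by
  exact pv_count_set_lt cards i.1
    (by have := (PySem.List.mem_pyRange_one.mp i.2).1; omega) (not_not.mp h)

-- ===== PORT B =====
-- port of Source B's _expand: [c + [v] for c in combos for v in range(2, 15)]
def pvExpand (combos : List (List Int)) : List (List Int) :=
  combos.flatMap (fun c => (PySem.List.pyRange 2 15 1).map (fun v => c ++ [v]))

def replace_jokers_alt (cards : List Int) : List (List Int) :=
  -- idxs = [i for i, c in enumerate(cards) if c == 1]
  let idxs := (PySem.List.enumerate cards).filterMap (fun p => if p.2 = 1 then some p.1 else none)
  -- combos = [[]]; for _ in idxs: combos = _expand(combos)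
  let combos := idxs.foldl (fun acc _ => pvExpand acc) [[]]
  -- for combo in combos: new = list(cards); for j, v in zip(idxs, combo): new[j] = v
  -- (every j comes from enumerate, hence j ≥ 0, so .toNat is exact here)
  combos.map (fun combo =>
    (idxs.zip combo).foldl (fun new jv => new.set jv.1.toNat jv.2) cards)

-- ===== PRECONDITION & SPEC =====
def Spec_replace_jokers (cards : List Int) (out : List (List Int)) : Prop := out = replace_jokers_alt cards
instance (cards : List Int) (out : List (List Int)) : Decidable (Spec_replace_jokers cards out) := by unfold Spec_replace_jokers; infer_instance

-- ===== CLAIM (what is proved, stated in full; the proofs are below) =====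
def Claim_equal_replace_jokers : Prop := ∀ (cards : List Int), Dom_replace_jokers cards → Spec_replace_jokers cards (replace_jokers cards)

-- ===== LEMMAS AND PROOFS =====

-- the joker-index list that Source B computes, with a general enumerate start for induction
def pvJ (s : Int) (cards : List Int) : List Int :=
  (PySem.List.enumerate cards s).filterMap (fun p => if p.2 = 1 then some p.1 else none)

-- apply one replacement tuple, as in port B's inner foldl
def pvApply (base : List Int) (idxs combo : List Int) : List Int :=
  (idxs.zip combo).foldl (fun new jv => new.set jv.1.toNat jv.2) base

theorem pvJ_nil (s : Int) (cards : List Int) (h : (1:Int) ∉ cards) : pvJ s cards = [] := by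
  induction cards generalizing s with
  | nil => rfl
  | cons x xs ih =>
    have hx : x ≠ 1 := fun hh => h (hh ▸ List.mem_cons_self)
    simp only [pvJ, PySem.List.enumerate_cons, List.filterMap_cons, hx]
    exact ih (s+1) (fun hh => h (List.mem_cons_of_mem _ hh))

theorem pvJ_first (s : Int) (cards : List Int) (h : (1:Int) ∈ cards) (i : Int) (hi : i ≠ 1) :
    pvJ s cards = (s + ((PySem.List.index? cards 1).getD 0 : Nat)) ::
      pvJ s (cards.set ((PySem.List.index? cards 1).getD 0) i) := by
  induction cards generalizing s with
  | nil => cases h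
  | cons x xs ih =>
    by_cases hx : x = 1
    · subst hx
      rw [PySem.List.index?_cons_self]
      simp [pvJ, PySem.List.enumerate_cons, hi]
    · have hmem : (1:Int) ∈ xs := by
        rcases List.mem_cons.mp h with h1 | h1
        · exact absurd h1.symm hx
        · exact h1
      obtain ⟨k, hk⟩ := Option.isSome_iff_exists.mp ((PySem.List.index?_isSome_iff xs 1).mpr hmem)
      rw [PySem.List.index?_cons_of_ne xs hx, hk]
      simp only [Option.map_some, Option.getD_some, List.set_cons_succ]
      simp only [pvJ, PySem.List.enumerate_cons, List.filterMap_cons, if_neg hx]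
      have := ih (s+1) hmem
      rw [hk] at this
      simp only [Option.getD_some, pvJ] at this
      rw [this]
      congr 1
      push_cast
      ring

theorem pv_foldl_const {α β : Type} (f : β → β) (l : List α) (acc : β) :
    l.foldl (fun a _ => f a) acc = f^[l.length] acc := by
  induction l generalizing acc with
  | nil => rfl
  | cons x xs ih => simp [ih, Function.iterate_succ_apply]

theorem pv_flatMap_congr {α β : Type} (l : List α) (f g : α → List β)
    (h : ∀ a ∈ l, f a = g a) : l.flatMap f = l.flatMap g := by
  induction l with
  | nil => rfl
  | cons x xs ih =>
    simp only [List.flatMap_cons, h x List.mem_cons_self,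
      ih (fun a ha => h a (List.mem_cons_of_mem _ ha))]

theorem pvExpand_map (xs : List (List Int)) (v : Int) :
    pvExpand (xs.map (fun c => v :: c)) = (pvExpand xs).map (fun c => v :: c) := by
  simp [pvExpand, List.flatMap_map, List.map_flatMap, List.map_map, Function.comp_def]

theorem pvExpand_iter_succ (n : Nat) :
    pvExpand^[n+1] [[]] =
      (PySem.List.pyRange 2 15 1).flatMap (fun v => (pvExpand^[n] [[]]).map (fun c => v :: c)) := by
  induction n with
  | zero => decide
  | succ n ih =>
    rw [Function.iterate_succ_apply', ih]
    show pvExpand _ = _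
    rw [pvExpand, List.flatMap_assoc]
    refine pv_flatMap_congr _ _ _ (fun v _ => ?_)
    show pvExpand ((pvExpand^[n] [[]]).map (fun c => v :: c)) = _
    rw [pvExpand_map]
    congr 1
    rw [← ih]
    exact (Function.iterate_succ_apply' pvExpand n [[]]).symm

theorem pv_foldl_attach_flatMap (l : List Int) (G : Int → List (List Int)) :
    l.attach.foldl (fun sets i => sets ++ G i.1) [] = l.flatMap G := by
  rw [PySem.List.foldl_append_eq_flatMap]
  simp [List.flatMap]

theorem pv_alt_eq (cards : List Int) :
    replace_jokers_alt cards
      = (pvExpand^[(pvJ 0 cards).length] [[]]).map (pvApply cards (pvJ 0 cards)) := by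
  have h0 : replace_jokers_alt cards
      = (List.foldl (fun acc _ => pvExpand acc) [[]] (pvJ 0 cards)).map
          (pvApply cards (pvJ 0 cards)) := rfl
  rw [h0, pv_foldl_const]

theorem pv_main (n : Nat) : ∀ cards : List Int, cards.count 1 ≤ n →
    replace_jokers cards = replace_jokers_alt cards := by
  induction n with
  | zero =>
    intro cards hc
    have h : (1:Int) ∉ cards := by
      intro h
      have := List.count_pos_iff.mpr h
      omega
    rw [replace_jokers, dif_pos h, pv_alt_eq, pvJ_nil 0 cards h]
    rfl
  | succ n ih =>
    intro cards hc
    by_cases h : (1:Int) ∈ cards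
    · have hnn : ¬ (1:Int) ∉ cards := not_not.mpr h
      rw [replace_jokers, dif_neg hnn]
      show (PySem.List.pyRange 2 15 1).attach.foldl
          (fun sets i => sets ++ replace_jokers
            (cards.set ((PySem.List.index? cards 1).getD 0) i.1)) [] = _
      rw [pv_foldl_attach_flatMap (PySem.List.pyRange 2 15 1)
        (fun v => replace_jokers (cards.set ((PySem.List.index? cards 1).getD 0) v))]
      -- use the induction hypothesis on every branch
      rw [pv_flatMap_congr _ _
        (fun v => replace_jokers_alt (cards.set ((PySem.List.index? cards 1).getD 0) v))
        (fun v hv => by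
          have hv1 : v ≠ 1 := by have := (PySem.List.mem_pyRange_one.mp hv).1; omega
          exact ih _ (by have := pv_count_set_lt cards v hv1 h; omega))]
      -- B side: peel the first joker off idxs and the outermost factor off the product
      rw [pv_alt_eq, pvJ_first 0 cards h 2 (by norm_num)]
      rw [List.length_cons, pvExpand_iter_succ, List.map_flatMap]
      refine pv_flatMap_congr _ _ _ (fun v hv => ?_)
      have hv1 : v ≠ 1 := by have := (PySem.List.mem_pyRange_one.mp hv).1; omega
      have htl : pvJ 0 (cards.set ((PySem.List.index? cards 1).getD 0) v)
          = pvJ 0 (cards.set ((PySem.List.index? cards 1).getD 0) 2) := by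
        have h1 := pvJ_first 0 cards h v hv1
        have h2 := pvJ_first 0 cards h 2 (by norm_num)
        rw [h1] at h2
        simpa using h2
      rw [pv_alt_eq, htl, List.map_map]
      refine List.map_congr_left (fun c _ => ?_)
      show _ = pvApply (cards.set ((0:Int) + ((PySem.List.index? cards 1).getD 0 : Nat)).toNat v)
          (pvJ 0 (cards.set ((PySem.List.index? cards 1).getD 0) 2)) c
      norm_num
    · rw [replace_jokers, dif_pos h, pv_alt_eq, pvJ_nil 0 cards h]
      rfl

-- ===== VERDICT (by name: the statement is the Claim_ definition above) =====
theorem replace_jokers_spec : Claim_equal_replace_jokers := by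
  intro cards _
  unfold Spec_replace_jokers
  exact pv_main (cards.count 1) cards le_rfl
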